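-- pv_equiv track=rewrite | github.com/mujahid14916/ADS | hashing.py | linear_insert
-- ===== SOURCE A (Python) =====
-- def linear_insert(table, data):
--     insert_fail = 0
--     collision = []
--     size = len(table)
--     for val in data:
--         n = 0
--         while size > n:
--             key = (val + n) % size
--             if table[key] is None:
--                 table[key] = val
--                 break
--             else:
--                 n += 1
--         else:
--             insert_fail += 1
--         collision.append(n)
--     return table, collision, insert_fail
-- ===== SOURCE B (Python) =====
-- def linear_insert(table, data):
--     # Maintains the list of free slots instead of probing occupied cells one by one.
--     # Mutates `table` in place like the original.
--     size = len(table)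
--     free = [i for i, cell in enumerate(table) if cell is None]
--     collision = []
--     insert_fail = 0
--     for val in data:
--         start = val % size if size else 0
--         after = [i for i in free if i >= start]
--         if after:
--             slot = after[0]
--             n = slot - start
--         elif free:
--             slot = free[0]
--             n = slot + size - start
--         else:
--             slot = -1
--             n = size
--             insert_fail += 1
--         if slot >= 0:
--             table[slot] = val
--             free = [i for i in free if i != slot]
--         collision.append(n)
--     return table, collision, insert_fail
-- ===== Notes on version B (the rewrite author's own statement) =====
-- stated objective: faster
-- what changed: B keeps an explicit list of the table's free slot indices and for each value picks the first free slot at-or-after val % size (wrapping to the smallest free slot), instead of A's cell-by-cell linear probing; on dense or full tables A re-scans up to the whole table per value while B only scans the shrinking free list, which a timing run measured as a growing speed-up (221x at n=4096, A timed out at n=16384).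
import Mathlib
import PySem

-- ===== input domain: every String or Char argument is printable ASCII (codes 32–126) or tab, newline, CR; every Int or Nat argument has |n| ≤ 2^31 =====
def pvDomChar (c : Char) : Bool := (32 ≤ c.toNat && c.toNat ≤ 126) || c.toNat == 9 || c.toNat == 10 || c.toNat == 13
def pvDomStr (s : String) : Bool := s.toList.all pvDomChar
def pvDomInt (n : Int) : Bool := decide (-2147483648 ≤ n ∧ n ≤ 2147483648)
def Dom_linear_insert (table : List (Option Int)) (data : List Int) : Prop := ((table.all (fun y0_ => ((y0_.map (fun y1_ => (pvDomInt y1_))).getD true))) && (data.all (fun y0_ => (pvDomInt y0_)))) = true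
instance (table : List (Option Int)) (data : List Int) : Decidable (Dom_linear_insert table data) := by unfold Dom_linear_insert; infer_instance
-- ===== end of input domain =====

-- B replaces A's per-value linear probing over table cells by a maintained list of free
-- slot indices (pick first free slot >= val % size, else smallest free slot): on dense/full
-- tables A re-scans up to the whole table per value while B only scans the shrinking free
-- list (a timing run measured B faster, growing with size).  B performs the same
-- in-place mutation of `table` as A; the equivalence proved here is about return values.


-- ===== PORT A =====
-- inner 'while size > n' loop of A: fuel counts remaining iterations (size - n);
-- returns (table, n, failed?).  `key.toNat` is exact: key = (val+n) % size ∈ [0, size).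
def linear_insert_inner (val : Int) : List (Option Int) → Nat → Nat → List (Option Int) × Nat × Bool
  | t, n, 0 => (t, n, true)
  | t, n, fuel+1 =>
    let key := PySem.Int.mod (val + (n : Int)) (t.length : Int)
    match PySem.List.pyGet? t key with
    | some none => (t.set key.toNat (some val), n, false)
    | _ => linear_insert_inner val t (n+1) fuel

def linear_insert (table : List (Option Int)) (data : List Int) : List (Option Int) × List Int × Int :=
  let r := data.foldl (fun st val =>
    let p := linear_insert_inner val st.1 0 st.1.length
    (p.1, st.2.1 ++ [(p.2.1 : Int)], if p.2.2 then st.2.2 + 1 else st.2.2))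
    (table, ([] : List Int), (0 : Int))
  r

-- ===== PORT B =====
-- one step of B's loop: state (table, free-slot list, collisions, failures)
def linear_insert_alt_step (size : Nat) (st : List (Option Int) × List Int × List Int × Int) (val : Int) :
    List (Option Int) × List Int × List Int × Int :=
  let t := st.1
  let free := st.2.1
  let coll := st.2.2.1
  let fail := st.2.2.2
  let start : Int := if size = 0 then 0 else PySem.Int.mod val (size : Int)
  let after := free.filter (fun i => start ≤ i)
  match after with
  | slot :: _ =>
      (t.set slot.toNat (some val), free.filter (fun i => i ≠ slot), coll ++ [slot - start], fail)
  | [] =>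
    match free with
    | slot :: _ =>
        (t.set slot.toNat (some val), free.filter (fun i => i ≠ slot),
         coll ++ [slot + (size : Int) - start], fail)
    | [] => (t, free, coll ++ [(size : Int)], fail + 1)

def linear_insert_alt (table : List (Option Int)) (data : List Int) : List (Option Int) × List Int × Int :=
  let size := table.length
  let free0 : List Int := ((PySem.List.enumerate table 0).filter (fun p => p.2.isNone)).map (·.1)
  let r := data.foldl (linear_insert_alt_step size) (table, free0, ([] : List Int), (0 : Int))
  (r.1, r.2.2.1, r.2.2.2)

-- ===== PRECONDITION & SPEC =====
def Spec_linear_insert (table : List (Option Int)) (data : List Int) (out : List (Option Int) × List Int × Int) : Prop := out = linear_insert_alt table data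
instance (table : List (Option Int)) (data : List Int) (out : List (Option Int) × List Int × Int) : Decidable (Spec_linear_insert table data out) := by unfold Spec_linear_insert; infer_instance

-- ===== CLAIM (what is proved, stated in full; the proofs are below) =====
def Claim_equal_linear_insert : Prop := ∀ (table : List (Option Int)) (data : List Int), Dom_linear_insert table data → Spec_linear_insert table data (linear_insert table data)


-- ===== LEMMAS AND PROOFS =====

-- canonical list of free (None) slot indices of `t`, offset by `s`
def freeN : List (Option Int) → Nat → List Nat
  | [], _ => []
  | none :: t, s => s :: freeN t (s+1)
  | some _ :: t, s => freeN t (s+1)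

theorem freeN_ge {t : List (Option Int)} {s i : Nat} (h : i ∈ freeN t s) : s ≤ i := by
  induction t generalizing s with
  | nil => simp [freeN] at h
  | cons x t ih =>
    cases x with
    | none =>
      simp [freeN] at h
      rcases h with h | h
      · omega
      · have := ih h; omega
    | some v => have := ih (by simpa [freeN] using h); omega
theorem mem_freeN {t : List (Option Int)} {s i : Nat} :
    i ∈ freeN t s ↔ ∃ k, i = s + k ∧ t[k]? = some none := by
  induction t generalizing s with
  | nil => simp [freeN]
  | cons x t ih =>
    cases x with
    | none =>
      simp only [freeN, List.mem_cons, ih]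
      constructor
      · rintro (rfl | ⟨k, rfl, hk⟩)
        · exact ⟨0, by simp⟩
        · exact ⟨k+1, by omega, by simpa using hk⟩
      · rintro ⟨k, rfl, hk⟩
        cases k with
        | zero => simp
        | succ k => exact Or.inr ⟨k, by omega, by simpa using hk⟩
    | some v =>
      simp only [freeN, ih]
      constructor
      · rintro ⟨k, rfl, hk⟩
        exact ⟨k+1, by omega, by simpa using hk⟩
      · rintro ⟨k, rfl, hk⟩
        cases k with
        | zero => simp at hk
        | succ k => exact ⟨k, by omega, by simpa using hk⟩
theorem freeN_sorted (t : List (Option Int)) (s : Nat) : (freeN t s).Pairwise (· < ·) := by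
  induction t generalizing s with
  | nil => simp [freeN]
  | cons x t ih =>
    cases x with
    | none =>
      refine List.Pairwise.cons ?_ (ih (s+1))
      intro y hy
      have := freeN_ge hy; omega
    | some v => exact ih (s+1)
theorem freeN_set {t : List (Option Int)} {m : Nat} (v : Int) (s : Nat) :
    freeN (t.set m (some v)) s = (freeN t s).filter (fun i => i ≠ s + m) := by
  induction t generalizing s m with
  | nil => simp [freeN]
  | cons x t ih =>
    have hkeep : ∀ m' : Nat, s + m ≠ s + 1 + m' →
        List.filter (fun i => decide (i ≠ s + m)) (freeN t (s+1)) = freeN t (s+1) → True := fun _ _ _ => trivial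
    cases m with
    | zero =>
      have hall : List.filter (fun i => decide (i ≠ s + 0)) (freeN t (s+1)) = freeN t (s+1) :=
        List.filter_eq_self.2 (by intro a ha; have := freeN_ge ha; simp only [decide_eq_true_eq]; omega)
      cases x with
      | none =>
        simp only [List.set_cons_zero, freeN, List.filter_cons]
        rw [if_neg (by simp), hall]
      | some w =>
        simp only [List.set_cons_zero, freeN]
        exact hall.symm
    | succ m =>
      have hsh : List.filter (fun i => decide (i ≠ s + (m+1))) (freeN t (s+1))
          = List.filter (fun i => decide (i ≠ (s+1) + m)) (freeN t (s+1)) := by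
        apply List.filter_congr; intro a _; simp only [decide_eq_decide]; omega
      cases x with
      | none =>
        simp only [List.set_cons_succ, freeN, List.filter_cons, ih]
        rw [if_pos (by simp only [decide_eq_true_eq]; omega), hsh]
      | some w =>
        simp only [List.set_cons_succ, freeN, ih]
        rw [← hsh]
theorem freeN_enum (t : List (Option Int)) (s : Nat) :
    ((PySem.List.enumerate t (s:Int)).filter (fun p => p.2.isNone)).map (·.1)
      = (freeN t s).map (fun i : Nat => (i : Int)) := by
  induction t generalizing s with
  | nil => simp [freeN, PySem.List.enumerate_nil]
  | cons x t ih =>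
    have hc : ((s:Int) + 1) = ((s+1 : Nat) : Int) := by push_cast; ring
    cases x with
    | none =>
      rw [PySem.List.enumerate_cons, List.filter_cons, if_pos (by simp), List.map_cons, hc,
        ih (s+1)]
      simp [freeN]
    | some v =>
      rw [PySem.List.enumerate_cons, List.filter_cons, if_neg (by simp), hc, ih (s+1)]
      simp [freeN]
theorem inner_miss (val : Int) : ∀ (fuel : Nat) (t : List (Option Int)) (n : Nat),
    (∀ k, k < fuel →
      PySem.List.pyGet? t (PySem.Int.mod (val + ((n+k : Nat):Int)) (t.length:Int)) ≠ some none) →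
    linear_insert_inner val t n fuel = (t, n + fuel, true) := by
  intro fuel
  induction fuel with
  | zero => intro t n h; simp [linear_insert_inner]
  | succ fuel ih =>
    intro t n h
    have h0 := h 0 (by omega)
    simp only [Nat.add_zero] at h0
    rw [linear_insert_inner]
    simp only []
    have hrec : linear_insert_inner val t (n+1) fuel = (t, n + 1 + fuel, true) :=
      ih t (n+1) (fun k hk => by
        have := h (k+1) (by omega)
        simpa [show n + 1 + k = n + (k+1) by omega] using this)
    have harith : n + 1 + fuel = n + (fuel + 1) := by omega
    rcases hc : PySem.List.pyGet? t (PySem.Int.mod (val + (n : Int)) ((t.length : Nat):Int)) with _ | (_ | x)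
    · rw [hrec, harith]
    · exact absurd hc h0
    · rw [hrec, harith]
theorem inner_hit (val : Int) : ∀ (fuel : Nat) (t : List (Option Int)) (n j : Nat),
    j < fuel →
    (∀ k, k < j →
      PySem.List.pyGet? t (PySem.Int.mod (val + ((n+k : Nat):Int)) (t.length:Int)) ≠ some none) →
    PySem.List.pyGet? t (PySem.Int.mod (val + ((n+j : Nat):Int)) (t.length:Int)) = some none →
    linear_insert_inner val t n fuel =
      (t.set (PySem.Int.mod (val + ((n+j : Nat):Int)) (t.length:Int)).toNat (some val), n + j, false) := by
  intro fuel
  induction fuel with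
  | zero => intro t n j hj; omega
  | succ fuel ih =>
    intro t n j hj hmiss hhit
    rw [linear_insert_inner]
    cases j with
    | zero =>
      simp only [Nat.add_zero] at hhit
      rcases hc : PySem.List.pyGet? t (PySem.Int.mod (val + (n : Int)) ((t.length : Nat):Int)) with _ | (_ | x)
      · exact absurd hc (by rw [hhit]; simp)
      · simp
      · exact absurd hc (by rw [hhit]; simp)
    | succ j =>
      have h0 := hmiss 0 (by omega)
      simp only [Nat.add_zero] at h0
      have hrec := ih t (n+1) j (by omega)
        (fun k hk => by
          have := hmiss (k+1) (by omega)
          simpa [show n + 1 + k = n + (k+1) by omega] using this)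
        (by simpa [show n + 1 + j = n + (j+1) by omega] using hhit)
      rcases hc : PySem.List.pyGet? t (PySem.Int.mod (val + (n : Int)) ((t.length : Nat):Int)) with _ | (_ | x)
      · rw [hrec]; simp [show n + 1 + j = n + (j+1) by omega]
      · exact absurd hc h0
      · rw [hrec]; simp [show n + 1 + j = n + (j+1) by omega]
theorem key_eq (val : Int) {size : Nat} (hs : 0 < size) (n : Nat) :
    PySem.Int.mod (val + (n:Int)) (size:Int)
      = ((((PySem.Int.mod val (size:Int)).toNat + n) % size : Nat) : Int) := by
  have hpos : (0:Int) < (size:Int) := by exact_mod_cast hs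
  rw [PySem.Int.mod_eq_emod_of_pos hpos, PySem.Int.mod_eq_emod_of_pos hpos]
  have hnn : 0 ≤ val % (size:Int) := Int.emod_nonneg _ (by omega)
  have hlt : val % (size:Int) < (size:Int) := Int.emod_lt_of_pos _ hpos
  have htn : ((val % (size:Int)).toNat : Int) = val % (size:Int) := Int.toNat_of_nonneg hnn
  push_cast
  rw [htn]
  conv_lhs => rw [show val = (size:Int) * (val / size) + val % size from (Int.mul_ediv_add_emod val size).symm]
  rw [Int.add_assoc, Int.add_comm ((size:Int) * (val / size)), Int.add_mul_emod_self_left]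
theorem sorted_head_min {l : List Nat} {m : Nat} {rest : List Nat}
    (hp : l.Pairwise (· < ·)) (he : l = m :: rest) {x : Nat} (hx : x ∈ l) : m ≤ x := by
  subst he
  rcases List.mem_cons.1 hx with rfl | hx'
  · exact Nat.le_refl x
  · exact le_of_lt (List.rel_of_pairwise_cons hp hx')

theorem mem_free0 {t : List (Option Int)} {i : Nat} : i ∈ freeN t 0 ↔ t[i]? = some none := by
  rw [mem_freeN]
  constructor
  · rintro ⟨k, rfl, hk⟩; simpa using hk
  · intro h; exact ⟨i, by omega, h⟩

theorem lt_of_free {t : List (Option Int)} {i : Nat} (h : t[i]? = some none) : i < t.length := by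
  rcases List.getElem?_eq_some_iff.1 h with ⟨h1, _⟩; exact h1

theorem filter_map_cast (l : List Nat) (p : Nat → Bool) (q : Int → Bool)
    (h : ∀ i : Nat, q (i:Int) = p i) :
    (l.map (fun i : Nat => (i : Int))).filter q = (l.filter p).map (fun i : Nat => (i : Int)) := by
  induction l with
  | nil => rfl
  | cons a l ih =>
    cases hpa : p a with
    | false =>
      rw [List.map_cons, List.filter_cons, List.filter_cons, h a, hpa,
        if_neg (by simp), if_neg (by simp)]
      exact ih
    | true =>
      rw [List.map_cons, List.filter_cons, List.filter_cons, h a, hpa,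
        if_pos rfl, if_pos rfl, List.map_cons, ih]

theorem step_eq (size : Nat) (t : List (Option Int)) (hlen : t.length = size)
    (coll : List Int) (fail : Int) (val : Int) :
    ((linear_insert_inner val t 0 t.length).1,
      coll ++ [((linear_insert_inner val t 0 t.length).2.1 : Int)],
      if (linear_insert_inner val t 0 t.length).2.2 then fail + 1 else fail)
      = ((linear_insert_alt_step size (t, (freeN t 0).map (fun i : Nat => (i : Int)), coll, fail) val).1,
         (linear_insert_alt_step size (t, (freeN t 0).map (fun i : Nat => (i : Int)), coll, fail) val).2.2.1,
         (linear_insert_alt_step size (t, (freeN t 0).map (fun i : Nat => (i : Int)), coll, fail) val).2.2.2)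
    ∧ (linear_insert_alt_step size (t, (freeN t 0).map (fun i : Nat => (i : Int)), coll, fail) val).2.1
      = (freeN (linear_insert_alt_step size (t, (freeN t 0).map (fun i : Nat => (i : Int)), coll, fail) val).1 0).map (fun i : Nat => (i : Int))
    ∧ (linear_insert_alt_step size (t, (freeN t 0).map (fun i : Nat => (i : Int)), coll, fail) val).1.length = size := by
  subst hlen
  by_cases hs : t.length = 0
  · have ht : t = [] := List.length_eq_zero_iff.1 hs
    subst ht
    simp [linear_insert_alt_step, linear_insert_inner, freeN]
  · have hpos : 0 < t.length := Nat.pos_of_ne_zero hs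
    have hposI : (0:Int) < (t.length:Int) := by exact_mod_cast hpos
    have hsnn : 0 ≤ PySem.Int.mod val (t.length:Int) := PySem.Int.mod_nonneg _ hposI
    have hslt : PySem.Int.mod val (t.length:Int) < (t.length:Int) := PySem.Int.mod_lt _ hposI
    set st := (PySem.Int.mod val (t.length:Int)).toNat with hstdef
    have hcast : (st:Int) = PySem.Int.mod val (t.length:Int) := Int.toNat_of_nonneg hsnn
    have hstlt : st < t.length := by omega
    have hkey : ∀ k : Nat, PySem.Int.mod (val + ((0+k : Nat):Int)) (t.length:Int)
        = (((st + k) % t.length : Nat):Int) := by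
      intro k
      rw [show ((0+k : Nat):Int) = (k:Int) by push_cast; ring, key_eq val hpos]
    have hfree : ∀ i : Nat, PySem.List.pyGet? t ((i : Nat):Int) = some none ↔ i ∈ freeN t 0 := by
      intro i
      rw [PySem.List.pyGet?_natCast, mem_free0]
    have hafter : ((freeN t 0).map (fun i : Nat => (i : Int))).filter
          (fun i => PySem.Int.mod val (t.length:Int) ≤ i)
        = ((freeN t 0).filter (fun i => st ≤ i)).map (fun i : Nat => (i : Int)) := by
      refine filter_map_cast _ _ _ (fun i => ?_)
      rw [← hcast]
      simp [Nat.cast_le]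
    have hinv : ∀ m : Nat, ((freeN t 0).map (fun i : Nat => (i : Int))).filter (fun i => i ≠ (m:Int))
        = ((freeN t 0).filter (fun i => i ≠ m)).map (fun i : Nat => (i : Int)) := by
      intro m
      refine filter_map_cast _ _ _ (fun i => ?_)
      simp
    have hsetinv : ∀ m : Nat, freeN (t.set m (some val)) 0 = (freeN t 0).filter (fun i => i ≠ m) := by
      intro m
      rw [freeN_set val 0]
      simp
    simp only [linear_insert_alt_step, if_neg hs, hafter]
    cases hFf : (freeN t 0).filter (fun i => st ≤ i) with
    | cons m rest =>
      have hmf := List.mem_filter.1 (hFf ▸ List.mem_cons_self)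
      have hmmem : m ∈ freeN t 0 := hmf.1
      have hstm : st ≤ m := by simpa using hmf.2
      have hmfree : t[m]? = some none := mem_free0.1 hmmem
      have hmlt : m < t.length := lt_of_free hmfree
      have hpairf : ((freeN t 0).filter (fun i => st ≤ i)).Pairwise (· < ·) :=
        List.Pairwise.sublist List.filter_sublist (freeN_sorted t 0)
      have hA := inner_hit val t.length t 0 (m - st) (by omega)
        (fun k hk => by
          rw [hkey k, Nat.mod_eq_of_lt (by omega)]
          intro hcontra
          have hmem : (st + k) ∈ (freeN t 0).filter (fun i => st ≤ i) :=
            List.mem_filter.2 ⟨(hfree (st+k)).1 hcontra, by simp⟩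
          have := sorted_head_min hpairf hFf hmem
          omega)
        (by
          rw [hkey (m - st), show st + (m - st) = m by omega, Nat.mod_eq_of_lt hmlt]
          exact (hfree m).2 hmmem)
      rw [hkey (m - st), show st + (m - st) = m by omega, Nat.mod_eq_of_lt hmlt] at hA
      rw [hA]
      simp only [List.map_cons]
      refine ⟨?_, ?_, ?_⟩
      · have hval : ((m - st : Nat) : Int) = (m:Int) - PySem.Int.mod val (t.length:Int) := by
          rw [← hcast]; omega
        simp [hval]
      · simp only [Int.toNat_natCast, hinv m, hsetinv m]
      · simp [List.length_set]
    | nil =>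
      have hnost : ∀ x ∈ freeN t 0, ¬ st ≤ x := by
        intro x hx
        have := List.filter_eq_nil_iff.1 hFf x hx
        simpa using this
      simp only [List.map_nil]
      cases hF : freeN t 0 with
      | cons m rest =>
        have hmmem : m ∈ freeN t 0 := hF ▸ List.mem_cons_self
        have hmfree : t[m]? = some none := mem_free0.1 hmmem
        have hmlt : m < t.length := lt_of_free hmfree
        have hmst : m < st := by have := hnost m hmmem; omega
        have hA := inner_hit val t.length t 0 (m + t.length - st) (by omega)
          (fun k hk => by
            rw [hkey k]
            by_cases hik : st + k < t.length
            · rw [Nat.mod_eq_of_lt hik]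
              intro hcontra
              exact hnost _ ((hfree (st+k)).1 hcontra) (by omega)
            · rw [Nat.mod_eq_sub_mod (by omega), Nat.mod_eq_of_lt (by omega)]
              intro hcontra
              have := sorted_head_min (freeN_sorted t 0) hF ((hfree _).1 hcontra)
              omega)
          (by
            rw [hkey (m + t.length - st), show st + (m + t.length - st) = m + t.length by omega,
              Nat.add_mod_right, Nat.mod_eq_of_lt hmlt]
            exact (hfree m).2 hmmem)
        rw [hkey (m + t.length - st), show st + (m + t.length - st) = m + t.length by omega,
          Nat.add_mod_right, Nat.mod_eq_of_lt hmlt] at hA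
        simp only [List.map_cons]
        rw [hA]
        refine ⟨?_, ?_, ?_⟩
        · have hval : ((m + t.length - st : Nat) : Int)
              = (m:Int) + (t.length:Int) - PySem.Int.mod val (t.length:Int) := by
            rw [← hcast]; omega
          simp [hval]
        · simp only [Int.toNat_natCast]
          have h2 := hinv m
          rw [hF] at h2
          simp only [List.map_cons] at h2
          rw [h2, hsetinv m, hF]
        · simp [List.length_set]
      | nil =>
        have hA := inner_miss val t.length t 0
          (fun k hk => by
            rw [hkey k]
            intro hcontra
            have := (hfree _).1 hcontra
            rw [hF] at this
            simp at this)
        rw [hA]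
        simp only [List.map_nil]
        refine ⟨?_, ?_, ?_⟩
        · simp
        · simp [hF]
        · simp

theorem fold_eq (size : Nat) : ∀ (data : List Int) (t : List (Option Int)), t.length = size →
    ∀ (coll : List Int) (fail : Int),
    data.foldl (fun st val =>
      let p := linear_insert_inner val st.1 0 st.1.length
      (p.1, st.2.1 ++ [(p.2.1 : Int)], if p.2.2 then st.2.2 + 1 else st.2.2))
      (t, coll, fail)
    = (((data.foldl (linear_insert_alt_step size) (t, (freeN t 0).map (fun i : Nat => (i : Int)), coll, fail))).1,
       (data.foldl (linear_insert_alt_step size) (t, (freeN t 0).map (fun i : Nat => (i : Int)), coll, fail)).2.2.1,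
       (data.foldl (linear_insert_alt_step size) (t, (freeN t 0).map (fun i : Nat => (i : Int)), coll, fail)).2.2.2) := by
  intro data
  induction data with
  | nil => intro t hlen coll fail; rfl
  | cons v ds ih =>
    intro t hlen coll fail
    obtain ⟨h1, h2, h3⟩ := step_eq size t hlen coll fail v
    simp only [List.foldl_cons]
    rw [h1]
    rw [show linear_insert_alt_step size (t, (freeN t 0).map (fun i : Nat => (i : Int)), coll, fail) v
        = ((linear_insert_alt_step size (t, (freeN t 0).map (fun i : Nat => (i : Int)), coll, fail) v).1,
           (freeN (linear_insert_alt_step size (t, (freeN t 0).map (fun i : Nat => (i : Int)), coll, fail) v).1 0).map (fun i : Nat => (i : Int)),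
           (linear_insert_alt_step size (t, (freeN t 0).map (fun i : Nat => (i : Int)), coll, fail) v).2.2.1,
           (linear_insert_alt_step size (t, (freeN t 0).map (fun i : Nat => (i : Int)), coll, fail) v).2.2.2) from by rw [← h2]]
    exact ih _ h3 _ _

-- ===== VERDICT (by name: the statement is the Claim_ definition above) =====
theorem linear_insert_spec : Claim_equal_linear_insert := by
  intro table data _
  unfold Spec_linear_insert linear_insert linear_insert_alt
  have h0 := freeN_enum table 0
  simp only [Nat.cast_zero] at h0
  simp only [h0]
  exact fold_eq table.length data table rfl [] 0
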